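-- pv_equiv track=rewrite | github.com/essential2189/Algorithm | 백준/Gold/17471. 게리맨더링/게리맨더링.py | solution
-- ===== SOURCE A (Python) =====
-- from collections import deque, defaultdict
-- from itertools import combinations
--
-- def bfs(people, graph, same):
--     start = same[0]
--     visited = {start}
--     q = deque([start])
--     p_sum = 0
--
--     while q:
--         i = q.popleft()
--         p_sum += people[i]
--
--         for node in graph[i]:
--             if node not in visited and node in same:
--                 q.append(node)
--                 visited.add(node)
--
--     return p_sum, len(visited)
--
-- def solution(n, people, area):
--     graph = defaultdict(list)
--     result = float("inf")
--
--     for i in range(n):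
--         for a in area[i][1:]:
--             graph[i].append(a - 1)  # 구역이 1번부터 시작하기에 0부터 시작하게끔
--
--     for i in range(1, n // 2 + 1):
--         combis = list(combinations(range(n), i))    # 조합을 사용하여 구역을 나눈다. 이때 n의 절반(0~n // 2)만큼만 조합을 구하면 된다. 이는 mCn = n - mCn이 성립하는 조합의 성질을 잘 생각해보면 알 수 있다. 즉, 한 선거구에 m개의 구역을 할당하면, 다른 선거구에 n-m개의 구역이 자동적으로 할당된다.
--         for combi in combis:
--             people_sum1, count_area1 = bfs(people, graph, combi)     # 1구역의 인구수와 구역 갯수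
--             people_sum2, count_area2 = bfs(people, graph, [i for i in range(n) if i not in combi])     # 남은 2구역의 인구수와 구역 갯수
--
--             if count_area1 + count_area2 == n:   # 1구역과 2구역의 구역 갯수의 합이 n과 같은지 검증
--                 result = min(result, abs(people_sum1 - people_sum2))
--
--     if result == float("inf"):
--         return -1
--
--     return result
-- ===== SOURCE B (Python) =====
-- from itertools import combinations
--
--
-- def solution(n, people, area):
--     # neighbor bitmasks: bit v of nbr[i] is set iff district v+1 is listed for district i
--     # (references outside 1..n can never belong to a side, so they are dropped)
--     nbr = []
--     for i in range(n):
--         m = 0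
--         for a in area[i][1:]:
--             if 1 <= a <= n:
--                 m |= 1 << (a - 1)
--         nbr.append(m)
--
--     def closed(mask, start):
--         # saturate reachability inside `mask` as a bitset fixpoint (no queue/stack)
--         r = 1 << start
--         while True:
--             nr = r
--             for i in range(n):
--                 if (r >> i) & 1:
--                     nr |= nbr[i]
--             nr &= mask
--             nr |= r
--             if nr == r:
--                 return r == mask
--             r = nr
--
--     total = sum(people[:n])
--     best = None
--     for k in range(1, n // 2 + 1):
--         for combi in combinations(range(n), k):
--             m1 = 0
--             for v in combi:
--                 m1 |= 1 << v
--             m2 = ((1 << n) - 1) ^ m1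
--             s2 = 0
--             while (m1 >> s2) & 1:
--                 s2 += 1
--             if closed(m1, combi[0]) and closed(m2, s2):
--                 s1 = sum(people[v] for v in combi)
--                 d = abs(2 * s1 - total)
--                 if best is None or d < best:
--                     best = d
--     return -1 if best is None else best
-- ===== Notes on version B (the rewrite author's own statement) =====
-- stated objective: alternative
-- what changed: Per-subset deque-BFS over people/visited sets is replaced by integer-bitset machinery: neighbor bitmasks are precomputed once, each side becomes a bitmask, and connectivity is decided by a frontier-free round-based bitset saturation (OR neighbor masks of set bits, AND with the side mask, until a fixpoint) compared against the side mask, with side sums taken directly and the difference computed as abs(2*s1-total).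
import Mathlib
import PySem

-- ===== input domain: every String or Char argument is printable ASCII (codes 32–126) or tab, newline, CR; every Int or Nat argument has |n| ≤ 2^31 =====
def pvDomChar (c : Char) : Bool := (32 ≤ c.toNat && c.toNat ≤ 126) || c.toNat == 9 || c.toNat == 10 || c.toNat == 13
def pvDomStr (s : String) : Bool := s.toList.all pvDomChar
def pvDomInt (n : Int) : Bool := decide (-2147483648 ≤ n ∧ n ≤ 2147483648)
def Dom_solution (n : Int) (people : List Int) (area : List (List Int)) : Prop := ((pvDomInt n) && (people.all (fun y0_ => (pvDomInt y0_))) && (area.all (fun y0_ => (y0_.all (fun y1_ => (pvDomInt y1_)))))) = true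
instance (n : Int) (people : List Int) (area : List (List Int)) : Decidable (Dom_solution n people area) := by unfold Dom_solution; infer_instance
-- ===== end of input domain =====

-- B replaces the per-subset deque-BFS (visited sets, queues, per-node sums) by integer-bitset
-- machinery: precomputed neighbor bitmasks, sides as bitmasks, and a frontier-free round-based
-- bitset saturation compared against the side mask; side sums are taken directly (abs(2*s1-total)).

-- ===== PORT A =====
-- bfs's while-loop over the deque; fuel = len(same)+1 always suffices (each append adds a fresh
-- visited node of `same`), and the fuel-0 fallback returns the same expression as the empty-queue exit.
def bfsLoop (people : List Int) (graph : PySem.Dict Int (List Int)) (same : List Int) :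
    Nat → List Int → PySem.Set Int → Int → Int × Int
  | 0, _, visited, psum => (psum, PySem.Set.len visited)
  | _ + 1, [], visited, psum => (psum, PySem.Set.len visited)
  | fuel + 1, i :: q', visited, psum =>
    let psum' := psum + PySem.List.pyGetD people i 0   -- people[i]; in range under Pre_
    let st := (graph.getD i []).foldl
      (fun (st : List Int × PySem.Set Int) node =>
        if node ∉ st.2 ∧ node ∈ same then (st.1 ++ [node], PySem.Set.add st.2 node) else st)
      (q', visited)
    bfsLoop people graph same fuel st.1 st.2 psum'

def bfs (people : List Int) (graph : PySem.Dict Int (List Int)) (same : List Int) : Int × Int :=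
  let start := PySem.List.pyGetD same 0 0              -- same[0]; same ≠ [] under Pre_
  bfsLoop people graph same (same.length + 1) [start] (PySem.Set.ofList [start]) 0

def solution (n : Int) (people : List Int) (area : List (List Int)) : Int :=
  let graph := (PySem.List.pyRange 0 n 1).foldl
    (fun g i => (PySem.List.slice (PySem.List.pyGetD area i []) (some 1) none).foldl
      (fun (g : PySem.Dict Int (List Int)) a => g.modify i [] (· ++ [a - 1])) g)
    PySem.Dict.empty
  -- result: float('inf') is modeled as none (all other values are ints)
  let result := (PySem.List.pyRange 1 (PySem.Int.floordiv n 2 + 1) 1).foldl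
    (fun result i =>
      (PySem.List.combinations (PySem.List.pyRange 0 n 1) i.toNat).foldl
        (fun (result : Option Int) combi =>
          let r1 := bfs people graph combi
          let r2 := bfs people graph ((PySem.List.pyRange 0 n 1).filter (fun j => decide (j ∉ combi)))
          if r1.2 + r2.2 = n then
            some (match result with
                  | none => |r1.1 - r2.1|
                  | some r => min r |r1.1 - r2.1|)
          else result)
        result)
    (none : Option Int)
  match result with
  | none => -1
  | some r => r

-- ===== PORT B =====
-- the inner `for a in area[i][1:]` of Source B's nbr construction
def nbrOf (n : Int) (row : List Int) : Nat :=
  (PySem.List.slice row (some 1) none).foldl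
    (fun m a => if 1 ≤ a ∧ a ≤ n then m ||| (1 <<< (a - 1).toNat) else m) 0

-- one round of Source B's `closed` while-loop: nr = r; or in neighbor masks; nr &= mask; nr |= r
def pvExpand (n : Int) (nbr : List Nat) (mask r : Nat) : Nat :=
  (((PySem.List.pyRange 0 n 1).foldl
      (fun nr i => if (r >>> i.toNat) &&& 1 == 1 then nr ||| PySem.List.pyGetD nbr i 0 else nr) r)
    &&& mask) ||| r

-- the `while True` saturation loop; fuel n+1 always suffices (every round before the fixpoint
-- adds at least one of the ≤ n bits of mask), and the fuel-0 fallback is the loop's exit expression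
def closLoop (n : Int) (nbr : List Nat) (mask : Nat) : Nat → Nat → Bool
  | 0, r => r == mask
  | fuel + 1, r =>
    let nr := pvExpand n nbr mask r
    if nr == r then r == mask else closLoop n nbr mask fuel nr

def closedB (n : Int) (nbr : List Nat) (mask start : Nat) : Bool :=
  closLoop n nbr mask (n.toNat + 1) (1 <<< start)

-- Source B's `while (m1 >> s2) & 1: s2 += 1`; fuel n suffices (m1 has < n set bits there)
def lowClearB (m1 : Nat) : Nat → Nat → Nat
  | 0, s => s
  | fuel + 1, s => if (m1 >>> s) &&& 1 == 1 then lowClearB m1 fuel (s + 1) else s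

def solution_alt (n : Int) (people : List Int) (area : List (List Int)) : Int :=
  let nbr := (PySem.List.pyRange 0 n 1).foldl
    (fun l i => l ++ [nbrOf n (PySem.List.pyGetD area i [])]) ([] : List Nat)
  let total := (PySem.List.slice people none (some n)).sum
  let best := (PySem.List.pyRange 1 (PySem.Int.floordiv n 2 + 1) 1).foldl
    (fun best k =>
      (PySem.List.combinations (PySem.List.pyRange 0 n 1) k.toNat).foldl
        (fun (best : Option Int) combi =>
          let m1 := combi.foldl (fun m v => m ||| (1 <<< v.toNat)) 0
          let m2 := ((1 <<< n.toNat) - 1) ^^^ m1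
          let s2 := lowClearB m1 n.toNat 0
          if closedB n nbr m1 (PySem.List.pyGetD combi 0 0).toNat && closedB n nbr m2 s2 then
            let s1 := (combi.map (fun v => PySem.List.pyGetD people v 0)).sum
            let d := |2 * s1 - total|
            match best with
            | none => some d
            | some b => if d < b then some d else best
          else best)
        best)
    (none : Option Int)
  match best with
  | none => -1
  | some b => b

-- ===== PRECONDITION & SPEC =====
-- Pre_ excludes exactly the inputs on which the Python A raises IndexError:
-- for n ≥ 1 it indexes area[0..n-1], and for n ≥ 2 every bfs run indexes people up to index n-1.
def Pre_solution (n : Int) (people : List Int) (area : List (List Int)) : Prop :=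
  (0 < n → n ≤ (area.length : Int)) ∧ (1 < n → n ≤ (people.length : Int))
instance (n : Int) (people : List Int) (area : List (List Int)) : Decidable (Pre_solution n people area) := by unfold Pre_solution; infer_instance

def pvWitness_solution : Int × List Int × List (List Int) := (2, [3, 7], [[1, 2], [1, 1]])

def Spec_solution (n : Int) (people : List Int) (area : List (List Int)) (out : Int) : Prop := out = solution_alt n people area
instance (n : Int) (people : List Int) (area : List (List Int)) (out : Int) : Decidable (Spec_solution n people area out) := by unfold Spec_solution; infer_instance

-- ===== CLAIM (what is proved, stated in full; the proofs are below) =====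
def Claim_equal_solution : Prop := ∀ (n : Int) (people : List Int) (area : List (List Int)), Dom_solution n people area → Pre_solution n people area → Spec_solution n people area (solution n people area)

-- ===== LEMMAS AND PROOFS =====

-- Bool helpers
lemma pvBoolCases (b : Bool) : b = false ∨ b = true := by cases b <;> simp

lemma pvAndTrue {a b : Bool} (h : (a && b) = true) : a = true ∧ b = true := by simpa using h

-- reachability: the common characterization both programs compute
def pvStep (f : Int → List Int) (S : List Int) (u v : Int) : Prop := v ∈ f u ∧ v ∈ S

def pvReach (f : Int → List Int) (S : List Int) (s v : Int) : Prop :=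
  Relation.ReflTransGen (pvStep f S) s v

lemma pvReach_mem {f : Int → List Int} {S : List Int} {s v : Int}
    (h : pvReach f S s v) : v ∈ S ∨ v = s := by
  induction h with
  | refl => exact Or.inr rfl
  | tail _ hst _ => exact Or.inl hst.2

lemma pvReach_congr {f g : Int → List Int} {S : List Int} {s v : Int}
    (hfg : ∀ u ∈ S, f u = g u) (hs : s ∈ S) (h : pvReach f S s v) : pvReach g S s v := by
  induction h with
  | refl => exact Relation.ReflTransGen.refl
  | tail hab hst ih =>
      rename_i b c
      have hb : b ∈ S := by
        rcases pvReach_mem hab with h' | h'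
        · exact h'
        · exact h' ▸ hs
      exact ih.tail ⟨(hfg b hb) ▸ hst.1, hst.2⟩

lemma pvReach_closedP {f : Int → List Int} {S : List Int} {s v : Int} (P : Int → Prop)
    (hsP : P s) (hcl : ∀ u, P u → ∀ w, pvStep f S u w → P w)
    (h : pvReach f S s v) : P v := by
  induction h with
  | refl => exact hsP
  | tail _ hst ih => exact hcl _ ih _ hst

lemma nodup_filter_mem_sublist {s l : List Int} (h : s.Sublist l) (hnd : l.Nodup) :
    l.filter (fun x => decide (x ∈ s)) = s := by
  induction h with
  | slnil => simp
  | @cons l1 l2 a h ih =>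
      have hnd' := List.nodup_cons.mp hnd
      have ha : a ∉ l1 := fun hm => hnd'.1 (h.subset hm)
      simp only [List.filter_cons]
      simp [ha, ih hnd'.2]
  | @cons₂ l1 l2 a h ih =>
      have hnd' := List.nodup_cons.mp hnd
      have hstep : l2.filter (fun x => decide (x ∈ a :: l1)) = l2.filter (fun x => decide (x ∈ l1)) := by
        apply List.filter_congr
        intro x hx
        have hxa : x ≠ a := fun hxa => hnd'.1 (hxa ▸ hx)
        simp [hxa]
      rw [show (a :: l2).filter (fun x => decide (x ∈ a :: l1)) = a :: l2.filter (fun x => decide (x ∈ a :: l1)) by simp]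
      rw [hstep, ih hnd'.2]

-- the neighbor loop of A's bfs: appends the fresh in-side neighbors to both the queue and visited
lemma foldA_spec (same : List Int) (l : List Int) (q0 V0 : List Int) (hnd : V0.Nodup) :
    ∃ new : List Int,
      l.foldl (fun (st : List Int × PySem.Set Int) node =>
          if node ∉ st.2 ∧ node ∈ same then (st.1 ++ [node], PySem.Set.add st.2 node) else st) (q0, V0)
        = (q0 ++ new, V0 ++ new)
      ∧ (V0 ++ new).Nodup
      ∧ (∀ w ∈ new, w ∈ l ∧ w ∈ same ∧ w ∉ V0)
      ∧ (∀ w ∈ l, w ∈ same → w ∈ V0 ++ new) := by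
  induction l generalizing q0 V0 with
  | nil => exact ⟨[], by simp, by simpa using hnd, by simp, by simp⟩
  | cons x ls ih =>
      by_cases hx : x ∉ V0 ∧ x ∈ same
      · have hst : (if x ∉ (V0 : PySem.Set Int) ∧ x ∈ same then (q0 ++ [x], PySem.Set.add V0 x) else (q0, V0)) = (q0 ++ [x], V0 ++ [x]) := by
          rw [if_pos hx, PySem.Set.add_of_not_mem hx.1]
        have hnd1 : (V0 ++ [x]).Nodup := by
          simp [List.nodup_append, hnd]
          intro a ha hax
          exact hx.1 (hax ▸ ha)
        obtain ⟨new', heq, hnodup, hmem, hcov⟩ := ih (q0 ++ [x]) (V0 ++ [x]) hnd1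
        refine ⟨x :: new', ?_, ?_, ?_, ?_⟩
        · simpa [hst, List.append_assoc] using heq
        · simpa [List.append_assoc] using hnodup
        · intro w hw
          rcases List.mem_cons.mp hw with rfl | hw'
          · exact ⟨List.mem_cons_self, hx.2, hx.1⟩
          · obtain ⟨h1, h2, h3⟩ := hmem w hw'
            exact ⟨List.mem_cons_of_mem _ h1, h2, fun hm => h3 (by simp [hm])⟩
        · intro w hw hws
          rcases List.mem_cons.mp hw with rfl | hw'
          · simp
          · have := hcov w hw' hws
            simpa [List.append_assoc] using this
      · have hst : (if x ∉ (V0 : PySem.Set Int) ∧ x ∈ same then (q0 ++ [x], PySem.Set.add V0 x) else (q0, V0)) = (q0, V0) := if_neg hx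
        obtain ⟨new', heq, hnodup, hmem, hcov⟩ := ih q0 V0 hnd
        refine ⟨new', ?_, hnodup, ?_, ?_⟩
        · simpa [hst] using heq
        · intro w hw
          obtain ⟨h1, h2, h3⟩ := hmem w hw
          exact ⟨List.mem_cons_of_mem _ h1, h2, h3⟩
        · intro w hw hws
          rcases List.mem_cons.mp hw with rfl | hw'
          · have hwV : w ∈ V0 := by
              by_contra hc
              exact hx ⟨hc, hws⟩
            exact List.mem_append_left _ hwV
          · exact hcov w hw' hws

-- A's bfs while-loop computes (sum over, cardinality of) the reachable set
lemma bfsLoop_reach (people : List Int) (graph : PySem.Dict Int (List Int)) (same : List Int)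
    (start : Int) :
    ∀ (fuel : Nat) (q V : List Int) (psum : Int),
      q.length + (same.length - V.length) ≤ fuel →
      V.Nodup → (∀ v ∈ q, v ∈ V) → (∀ v ∈ V, v ∈ same) →
      (∀ v ∈ V, pvReach (fun u => graph.getD u []) same start v) →
      (∀ u ∈ V, u ∉ q → ∀ w ∈ graph.getD u [], w ∈ same → w ∈ V) →
      (start ∈ V) →
      psum + (q.map (fun v => PySem.List.pyGetD people v 0)).sum
        = (V.map (fun v => PySem.List.pyGetD people v 0)).sum →
      ∃ Vf : List Int,
        bfsLoop people graph same fuel q V psum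
          = ((Vf.map (fun v => PySem.List.pyGetD people v 0)).sum, (Vf.length : Int))
        ∧ Vf.Nodup ∧ (∀ x, x ∈ Vf ↔ pvReach (fun u => graph.getD u []) same start x) := by
  intro fuel
  induction fuel with
  | zero =>
      intro q V psum hfuel hVnd hqV hVS hVR hcl hst hsum
      have hq : q = [] := List.eq_nil_of_length_eq_zero (by omega)
      subst hq
      refine ⟨V, ?_, hVnd, ?_⟩
      · simp only [bfsLoop]
        have : psum = (V.map (fun v => PySem.List.pyGetD people v 0)).sum := by
          simpa using hsum
        simp [PySem.Set.len, this]
      · intro x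
        constructor
        · exact hVR x
        · exact pvReach_closedP (fun y => y ∈ V) hst
            (fun u hu w hw => hcl u hu (by simp) w hw.1 hw.2)
  | succ fuel ih =>
      intro q V psum hfuel hVnd hqV hVS hVR hcl hst hsum
      match q with
      | [] =>
          refine ⟨V, ?_, hVnd, ?_⟩
          · simp only [bfsLoop]
            have : psum = (V.map (fun v => PySem.List.pyGetD people v 0)).sum := by
              simpa using hsum
            simp [PySem.Set.len, this]
          · intro x
            constructor
            · exact hVR x
            · exact pvReach_closedP (fun y => y ∈ V) hst
                (fun u hu w hw => hcl u hu (by simp) w hw.1 hw.2)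
      | i :: q' =>
          have hiV : i ∈ V := hqV i List.mem_cons_self
          obtain ⟨new, heq, hnodup, hmem, hcov⟩ := foldA_spec same (graph.getD i []) q' V hVnd
          have hsub : ∀ v ∈ V ++ new, v ∈ same := by
            intro v hv
            rcases List.mem_append.mp hv with hv | hv
            · exact hVS v hv
            · exact (hmem v hv).2.1
          have hlen : (V ++ new).length ≤ same.length := by
            have hsp := List.subperm_of_subset hnodup hsub
            exact hsp.length_le
          simp only [bfsLoop, heq]
          apply ih
          · simp only [List.length_append] at hlen ⊢
            simp only [List.length_cons] at hfuel
            omega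
          · exact hnodup
          · intro v hv
            rcases List.mem_append.mp hv with hv | hv
            · exact List.mem_append_left _ (hqV v (List.mem_cons_of_mem _ hv))
            · exact List.mem_append_right _ hv
          · exact hsub
          · intro v hv
            rcases List.mem_append.mp hv with hv | hv
            · exact hVR v hv
            · exact (hVR i hiV).tail ⟨(hmem v hv).1, (hmem v hv).2.1⟩
          · intro u hu huq w hw hwsame
            rcases List.mem_append.mp hu with hu | hu
            · by_cases hui : u = i
              · subst hui
                exact hcov w hw hwsame
              · have huq' : u ∉ (i :: q') := by
                  intro hm
                  rcases List.mem_cons.mp hm with h' | h'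
                  · exact hui h'
                  · exact huq (List.mem_append_left _ h')
                exact List.mem_append_left _ (hcl u hu huq' w hw hwsame)
            · exact absurd (List.mem_append_right q' hu) huq
          · exact List.mem_append_left _ hst
          · simp only [List.map_append, List.sum_append, List.map_cons, List.sum_cons] at hsum ⊢
            omega

lemma bfs_spec (people : List Int) (graph : PySem.Dict Int (List Int)) (same : List Int)
    (hnd : same.Nodup) (hne : same ≠ []) :
    ∃ Vf : List Int,
      bfs people graph same
        = ((Vf.map (fun v => PySem.List.pyGetD people v 0)).sum, (Vf.length : Int))
      ∧ Vf.Nodup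
      ∧ (∀ x, x ∈ Vf ↔ pvReach (fun u => graph.getD u []) same (PySem.List.pyGetD same 0 0) x) := by
  obtain ⟨s0, rest, rfl⟩ := List.exists_cons_of_ne_nil hne
  have hstart : PySem.List.pyGetD (s0 :: rest) 0 0 = s0 := PySem.List.pyGetD_zero_cons s0 rest 0
  have hof : PySem.Set.ofList [s0] = [s0] := PySem.Set.ofList_eq_self_of_nodup [s0] (List.nodup_singleton s0)
  simp only [bfs, hstart, hof]
  apply bfsLoop_reach
  · simp only [List.length_cons, List.length_nil]
    omega
  · exact List.nodup_singleton s0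
  · intro v hv; exact hv
  · intro v hv
    simp only [List.mem_singleton] at hv
    simp [hv]
  · intro v hv
    simp only [List.mem_singleton] at hv
    subst hv
    exact Relation.ReflTransGen.refl
  · intro u hu huq
    simp only [List.mem_singleton] at hu
    simp [hu] at huq
  · exact List.mem_singleton.mpr rfl
  · simp

-- the adjacency row A and B agree on: area[j][1:] shifted down by one
def pvRow (area : List (List Int)) (j : Int) : List Int :=
  (PySem.List.slice (PySem.List.pyGetD area j []) (some 1) none).map (fun a => a - 1)

lemma getD_fold_row (l : List Int) (g : PySem.Dict Int (List Int)) (i j : Int) :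
    (l.foldl (fun (g : PySem.Dict Int (List Int)) a => g.modify i [] (· ++ [a - 1])) g).getD j []
      = if j = i then g.getD j [] ++ l.map (fun a => a - 1) else g.getD j [] := by
  induction l generalizing g with
  | nil => simp
  | cons a l ih =>
      simp only [List.foldl_cons]
      rw [ih, PySem.Dict.getD_modify]
      by_cases h : j = i
      · subst h
        simp
      · simp [h]

lemma getD_graph (l : List Int) (area : List (List Int)) (g : PySem.Dict Int (List Int)) (j : Int)
    (hnd : l.Nodup) :
    (l.foldl (fun g i => (PySem.List.slice (PySem.List.pyGetD area i []) (some 1) none).foldl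
        (fun (g : PySem.Dict Int (List Int)) a => g.modify i [] (· ++ [a - 1])) g) g).getD j []
      = g.getD j [] ++ (if j ∈ l then pvRow area j else []) := by
  induction l generalizing g with
  | nil => simp
  | cons i l' ih =>
      have hnd' := List.nodup_cons.mp hnd
      simp only [List.foldl_cons]
      rw [ih _ hnd'.2, getD_fold_row]
      by_cases h : j = i
      · subst h
        have : j ∉ l' := hnd'.1
        simp [this, pvRow]
      · simp [h]

lemma total_map_take (n : Int) (people : List Int) (h0 : 0 ≤ n) (hn : n ≤ (people.length : Int)) :
    (PySem.List.pyRange 0 n 1).map (fun v => PySem.List.pyGetD people v 0) = people.take n.toNat := by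
  apply List.ext_getElem
  · rw [List.length_map, PySem.List.length_pyRange_one, List.length_take]
    omega
  · intro i h1 h2
    rw [List.length_map, PySem.List.length_pyRange_one] at h1
    rw [List.getElem_map, PySem.List.getElem_pyRange_one 0 n i (by rw [PySem.List.length_pyRange_one]; omega)]
    rw [List.getElem_take]
    rw [zero_add, PySem.List.pyGetD_natCast]
    exact List.getD_eq_getElem people 0 (by omega)

-- ===== bit-level lemmas for PORT B =====
lemma shiftAnd_eq_testBit (r s : Nat) : ((r >>> s) &&& 1 == 1) = r.testBit s := by
  have h0 : r.testBit s = (r >>> s).testBit 0 := by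
    rw [Nat.testBit_shiftRight, Nat.add_zero]
  rw [h0]
  rcases Nat.mod_two_eq_zero_or_one (r >>> s) with h | h <;>
    simp [Nat.testBit_zero, Nat.and_one_is_mod, h]

lemma testBit_one_shiftLeft (s i : Nat) : (1 <<< s).testBit i = decide (s = i) := by
  simp [Nat.shiftLeft_eq, Nat.testBit_two_pow]

lemma testBit_foldl_or (l : List Int) (cond : Int → Bool) (g : Int → Nat) (m0 : Nat) (x : Nat) :
    (l.foldl (fun nr i => if cond i then nr ||| g i else nr) m0).testBit x
      = (m0.testBit x || l.any (fun i => cond i && (g i).testBit x)) := by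
  induction l generalizing m0 with
  | nil => simp
  | cons a l ih =>
      simp only [List.foldl_cons, List.any_cons]
      by_cases h : cond a = true
      · rw [if_pos h, ih]
        simp [h, Nat.testBit_or, Bool.or_assoc]
      · have h' : cond a = false := by simpa using h
        rw [if_neg (by simp [h']), ih]
        simp [h']

lemma testBit_pvExpand (n : Int) (nbr : List Nat) (mask r : Nat) (x : Nat) :
    (pvExpand n nbr mask r).testBit x
      = (((r.testBit x || (PySem.List.pyRange 0 n 1).any
            (fun i => r.testBit i.toNat && (PySem.List.pyGetD nbr i 0).testBit x))
          && mask.testBit x) || r.testBit x) := by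
  unfold pvExpand
  rw [Nat.testBit_or, Nat.testBit_and, testBit_foldl_or]
  simp only [shiftAnd_eq_testBit]

lemma countP_lt_of_witness {α : Type} (l : List α) (p q : α → Bool)
    (h : ∀ x ∈ l, p x = true → q x = true) (x0 : α) (hx0 : x0 ∈ l)
    (hp : p x0 = false) (hq : q x0 = true) : l.countP p < l.countP q := by
  induction l with
  | nil => cases hx0
  | cons a l ih =>
      rw [List.countP_cons, List.countP_cons]
      rcases List.mem_cons.mp hx0 with rfl | hx
      · have hle : l.countP p ≤ l.countP q :=
          List.countP_mono_left (fun x hx hpx => h x (List.mem_cons_of_mem _ hx) hpx)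
        simp [hp, hq]
        omega
      · have hlt := ih (fun x hx hpx => h x (List.mem_cons_of_mem _ hx) hpx) hx
        by_cases hpa : p a = true
        · have hqa := h a List.mem_cons_self hpa
          simp [hpa, hqa]
          omega
        · have hpa' : p a = false := by simpa using hpa
          rcases pvBoolCases (q a) with hqa | hqa <;> simp [hpa', hqa] <;> omega

-- the saturation loop decides "every node of S is reachable from start inside S"
lemma closLoop_iff (n : Int) (nbr : List Nat) (mask : Nat) (S : List Int) (f : Int → List Int)
    (start : Nat)
    (hS : ∀ x : Nat, mask.testBit x = decide ((x : Int) ∈ S))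
    (hSn : ∀ v ∈ S, 0 ≤ v ∧ v < n)
    (hnbr : ∀ i : Nat, (i : Int) ∈ S → ∀ v : Nat,
        (PySem.List.pyGetD nbr (i : Int) 0).testBit v
          = (decide ((v : Int) ∈ f (i : Int)) && decide ((v : Int) < n))) :
    ∀ (fuel : Nat) (r : Nat),
      (∀ x : Nat, r.testBit x = true → (x : Int) ∈ S ∧ pvReach f S (start : Int) (x : Int)) →
      r.testBit start = true →
      (List.range n.toNat).countP (fun x => mask.testBit x && !r.testBit x) < fuel →
      (closLoop n nbr mask fuel r = true ↔ ∀ x ∈ S, pvReach f S (start : Int) x) := by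
  intro fuel
  induction fuel with
  | zero =>
      intro r _ _ hcnt
      exact absurd hcnt (Nat.not_lt_zero _)
  | succ fuel ih =>
      intro r hr hrst hcnt
      have hrmask : ∀ x : Nat, r.testBit x = true → mask.testBit x = true := by
        intro x hx
        rw [hS]
        simpa using (hr x hx).1
      -- bits of the expansion
      have hnr : ∀ x : Nat, (pvExpand n nbr mask r).testBit x = true →
          (x : Int) ∈ S ∧ pvReach f S (start : Int) (x : Int) := by
        intro x hx
        rw [testBit_pvExpand] at hx
        simp only [Bool.or_eq_true] at hx
        rcases hx with hx | hx
        · have hm : mask.testBit x = true := (pvAndTrue hx).2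
          have hxS : (x : Int) ∈ S := by
            have h2 := hS x
            rw [hm] at h2
            exact of_decide_eq_true h2.symm
          have hx1 := (pvAndTrue hx).1
          simp only [Bool.or_eq_true] at hx1
          rcases hx1 with hrx | hany
          · exact hr x hrx
          · obtain ⟨i, hiR, hib⟩ := List.any_eq_true.mp hany
            obtain ⟨hib1, hib2⟩ := pvAndTrue hib
            obtain ⟨hi0, _⟩ := PySem.List.mem_pyRange_one.mp hiR
            obtain ⟨hiS, hiReach⟩ := hr i.toNat hib1
            rw [Int.toNat_of_nonneg hi0] at hiS hiReach
            have hnb := hnbr i.toNat (by rwa [Int.toNat_of_nonneg hi0]) x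
            rw [Int.toNat_of_nonneg hi0] at hnb
            rw [hnb] at hib2
            obtain ⟨hfx, _⟩ := pvAndTrue hib2
            exact ⟨hxS, hiReach.tail ⟨of_decide_eq_true hfx, hxS⟩⟩
        · exact hr x hx
      have hr_sub_nr : ∀ x : Nat, r.testBit x = true → (pvExpand n nbr mask r).testBit x = true := by
        intro x hx
        rw [testBit_pvExpand, hx]
        simp
      simp only [closLoop]
      by_cases hfix : pvExpand n nbr mask r = r
      · rw [if_pos (by simpa using hfix)]
        -- at the fixpoint, r is closed under one step, hence contains every reachable node
        have hclosed : ∀ v : Int, pvReach f S (start : Int) v →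
            (v = (start : Int) ∨ v ∈ S) ∧ r.testBit v.toNat = true := by
          intro v hv
          refine pvReach_closedP (fun y => (y = (start : Int) ∨ y ∈ S) ∧ r.testBit y.toNat = true)
            ⟨Or.inl rfl, by simpa using hrst⟩ ?_ hv
          rintro u ⟨huS, hub⟩ w hw
          have hu0 : 0 ≤ u := by
            rcases huS with rfl | huS
            · exact Int.natCast_nonneg start
            · exact (hSn u huS).1
          have huS' : u ∈ S := by
            have h2 := (hr u.toNat hub).1
            rwa [Int.toNat_of_nonneg hu0] at h2
          obtain ⟨hwf, hwS⟩ := hw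
          obtain ⟨hw0, hwn⟩ := hSn w hwS
          refine ⟨Or.inr hwS, ?_⟩
          have hb' : (pvExpand n nbr mask r).testBit w.toNat = true := by
            rw [testBit_pvExpand]
            have hany : (PySem.List.pyRange 0 n 1).any
                (fun i => r.testBit i.toNat && (PySem.List.pyGetD nbr i 0).testBit w.toNat) = true := by
              apply List.any_eq_true.mpr
              refine ⟨u, PySem.List.mem_pyRange_one.mpr ⟨hu0, (hSn u huS').2⟩, ?_⟩
              rw [hub]
              have hnb := hnbr u.toNat (by rwa [Int.toNat_of_nonneg hu0]) w.toNat
              rw [Int.toNat_of_nonneg hu0] at hnb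
              rw [hnb]
              simp [Int.toNat_of_nonneg hw0, hwf, hwn]
            have hmw : mask.testBit w.toNat = true := by
              rw [hS]
              simp [Int.toNat_of_nonneg hw0, hwS]
            rw [hany, hmw]
            simp
          rwa [hfix] at hb'
        constructor
        · intro hrm x hxS
          have heq : r = mask := by simpa using hrm
          obtain ⟨hx0, hxn⟩ := hSn x hxS
          have hmb : mask.testBit x.toNat = true := by
            rw [hS]
            simp [Int.toNat_of_nonneg hx0, hxS]
          have h2 := (hr x.toNat (heq ▸ hmb)).2
          rwa [Int.toNat_of_nonneg hx0] at h2
        · intro hcov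
          have heq : r = mask := by
            apply Nat.eq_of_testBit_eq
            intro b
            rcases pvBoolCases (r.testBit b) with hb | hb
            · rcases pvBoolCases (mask.testBit b) with hm | hm
              · rw [hb, hm]
              · have hbS : (b : Int) ∈ S := by
                  have h2 := hS b
                  rw [hm] at h2
                  exact of_decide_eq_true h2.symm
                have h3 := (hclosed _ (hcov _ hbS)).2
                rw [Int.toNat_natCast] at h3
                rw [hb] at h3
                exact absurd h3 (by simp)
            · rw [hb, hrmask b hb]
          simp [heq]
      · rw [if_neg (by simpa using hfix)]
        apply ih
        · exact hnr
        · exact hr_sub_nr start hrst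
        · -- the count of missing mask bits strictly decreases
          obtain ⟨b, hb⟩ : ∃ b : Nat, (pvExpand n nbr mask r).testBit b ≠ r.testBit b := by
            by_contra hall
            push_neg at hall
            exact hfix (Nat.eq_of_testBit_eq hall)
          have hrb : r.testBit b = false := by
            rcases pvBoolCases (r.testBit b) with h' | h'
            · exact h'
            · exact absurd (hr_sub_nr b h') (by rw [h'] at hb; exact hb)
          have hnrb : (pvExpand n nbr mask r).testBit b = true := by
            rcases pvBoolCases ((pvExpand n nbr mask r).testBit b) with h' | h'
            · exact absurd (h'.trans hrb.symm) hb
            · exact h'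
          have hbS : (b : Int) ∈ S := (hnr b hnrb).1
          have hmb : mask.testBit b = true := by
            rw [hS]
            simpa using hbS
          have hbn : b < n.toNat := by
            have := (hSn _ hbS).2
            omega
          have hlt : (List.range n.toNat).countP
                (fun x => mask.testBit x && !(pvExpand n nbr mask r).testBit x)
              < (List.range n.toNat).countP (fun x => mask.testBit x && !r.testBit x) := by
            apply countP_lt_of_witness _ _ _ ?_ b (List.mem_range.mpr hbn)
            · simp [hmb, hnrb]
            · simp [hmb, hrb]
            · intro x _ hx
              obtain ⟨h1, h2⟩ := pvAndTrue hx
              rw [h1]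
              simp only [Bool.true_and]
              rcases pvBoolCases (r.testBit x) with h' | h'
              · simp [h']
              · exact absurd (hr_sub_nr x h') (by simpa using h2)
          omega

lemma closedB_iff (n : Int) (nbr : List Nat) (mask : Nat) (S : List Int) (f : Int → List Int)
    (start : Nat)
    (hS : ∀ x : Nat, mask.testBit x = decide ((x : Int) ∈ S))
    (hSn : ∀ v ∈ S, 0 ≤ v ∧ v < n)
    (hstart : (start : Int) ∈ S)
    (hnbr : ∀ i : Nat, (i : Int) ∈ S → ∀ v : Nat,
        (PySem.List.pyGetD nbr (i : Int) 0).testBit v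
          = (decide ((v : Int) ∈ f (i : Int)) && decide ((v : Int) < n))) :
    (closedB n nbr mask start = true ↔ ∀ x ∈ S, pvReach f S (start : Int) x) := by
  unfold closedB
  apply closLoop_iff n nbr mask S f start hS hSn hnbr
  · intro x hx
    rw [testBit_one_shiftLeft] at hx
    have hxs : start = x := of_decide_eq_true hx
    subst hxs
    exact ⟨hstart, Relation.ReflTransGen.refl⟩
  · rw [testBit_one_shiftLeft]
    simp
  · calc (List.range n.toNat).countP _ ≤ (List.range n.toNat).length := List.countP_le_length
      _ = n.toNat := List.length_range
      _ < n.toNat + 1 := Nat.lt_succ_self _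

lemma lowClearB_eq (m1 : Nat) :
    ∀ (fuel s t : Nat), s ≤ t → (∀ u, s ≤ u → u < t → m1.testBit u = true) →
      m1.testBit t = false → t - s ≤ fuel → lowClearB m1 fuel s = t := by
  intro fuel
  induction fuel with
  | zero =>
      intro s t h1 _ h3 h4
      have hst : s = t := by omega
      subst hst
      simp [lowClearB]
  | succ fuel ih =>
      intro s t h1 h2 h3 h4
      by_cases hst : s = t
      · subst hst
        have hcond : ((m1 >>> s) &&& 1 == 1) = false := by
          rw [shiftAnd_eq_testBit]
          exact h3
        simp only [lowClearB, hcond]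
        simp
      · have hs : m1.testBit s = true := h2 s le_rfl (by omega)
        have hcond : ((m1 >>> s) &&& 1 == 1) = true := by
          rw [shiftAnd_eq_testBit]
          exact hs
        simp only [lowClearB, hcond, if_true]
        exact ih (s + 1) t (by omega) (fun u hu hut => h2 u (by omega) hut) h3 (by omega)

lemma head_filter_pyRange (p : Int → Bool) (n : Int) :
    ∀ (k : Nat) (a t : Int), a ≤ t → t < n → (t - a).toNat ≤ k → p t = true →
      (∀ u, a ≤ u → u < t → p u = false) →
      PySem.List.pyGetD ((PySem.List.pyRange a n 1).filter p) 0 0 = t := by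
  intro k
  induction k with
  | zero =>
      intro a t h1 h2 h3 h4 _
      have hat : a = t := by omega
      subst hat
      rw [PySem.List.pyRange_one_cons (by omega)]
      simp [List.filter_cons, h4, PySem.List.pyGetD_zero_cons]
  | succ k ih =>
      intro a t h1 h2 h3 h4 h5
      by_cases hat : a = t
      · subst hat
        rw [PySem.List.pyRange_one_cons (by omega)]
        simp [List.filter_cons, h4, PySem.List.pyGetD_zero_cons]
      · have hpa : p a = false := h5 a le_rfl (by omega)
        rw [PySem.List.pyRange_one_cons (by omega)]
        simp only [List.filter_cons, hpa, Bool.false_eq_true, if_false]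
        exact ih (a + 1) t (by omega) h2 (by omega) h4 (fun u hu hut => h5 u (by omega) hut)

-- the side mask built from the subset: bit x ↔ x ∈ combi
lemma testBit_listMask (combi : List Int) (hpos : ∀ v ∈ combi, 0 ≤ v) :
    ∀ (m0 : Nat) (x : Nat),
      (combi.foldl (fun m v => m ||| (1 <<< v.toNat)) m0).testBit x
        = (m0.testBit x || decide ((x : Int) ∈ combi)) := by
  induction combi with
  | nil => intro m0 x; simp
  | cons a l ih =>
      intro m0 x
      have ha := hpos a List.mem_cons_self
      simp only [List.foldl_cons]
      rw [ih (fun v hv => hpos v (List.mem_cons_of_mem _ hv)) (m0 ||| (1 <<< a.toNat)) x]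
      rw [Nat.testBit_or, testBit_one_shiftLeft]
      have hax : (decide (a.toNat = x)) = (decide ((x : Int) = a)) := by
        apply decide_eq_decide.mpr
        omega
      rw [hax]
      simp [List.mem_cons, Bool.or_assoc, Bool.or_comm, Bool.or_left_comm, eq_comm]

-- the neighbor mask of one row: bit x ↔ x+1 occurs in area[i][1:] and x+1 ≤ n
lemma testBit_nbrOf_fold (n : Int) (l : List Int) :
    ∀ (m0 : Nat) (x : Nat),
      (l.foldl (fun m a => if 1 ≤ a ∧ a ≤ n then m ||| (1 <<< (a - 1).toNat) else m) m0).testBit x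
        = (m0.testBit x || decide (((x : Int) + 1) ∈ l ∧ (x : Int) + 1 ≤ n)) := by
  induction l with
  | nil => intro m0 x; simp
  | cons a l ih =>
      intro m0 x
      simp only [List.foldl_cons]
      by_cases hg : 1 ≤ a ∧ a ≤ n
      · rw [if_pos hg, ih]
        rw [Nat.testBit_or, testBit_one_shiftLeft]
        have hax : (decide ((a - 1).toNat = x)) = (decide ((x : Int) + 1 = a)) := by
          apply decide_eq_decide.mpr
          omega
        rw [hax]
        by_cases hxa : (x : Int) + 1 = a
        · simp [hxa, List.mem_cons, hg.2]
        · simp [hxa, List.mem_cons]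
      · rw [if_neg hg, ih]
        by_cases hxa : (x : Int) + 1 = a
        · have hxn : ¬ (a ≤ n) := by
            intro hc
            exact hg ⟨by omega, hc⟩
          simp [hxa, hxn, List.mem_cons]
        · simp [hxa, List.mem_cons]

lemma testBit_nbrOf (n : Int) (row : List Int) (x : Nat) :
    (nbrOf n row).testBit x
      = (decide ((x : Int) ∈ (PySem.List.slice row (some 1) none).map (fun a => a - 1))
          && decide ((x : Int) < n)) := by
  unfold nbrOf
  rw [testBit_nbrOf_fold]
  have h1 : ((x : Int) ∈ (PySem.List.slice row (some 1) none).map (fun a => a - 1))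
      ↔ ((x : Int) + 1) ∈ PySem.List.slice row (some 1) none := by
    rw [List.mem_map]
    constructor
    · rintro ⟨a, ha, hax⟩
      have : a = (x : Int) + 1 := by omega
      exact this ▸ ha
    · intro ha
      exact ⟨(x : Int) + 1, ha, by ring⟩
  have h2 : ((x : Int) + 1 ≤ n) ↔ ((x : Int) < n) := by omega
  rw [Nat.zero_testBit, Bool.false_or]
  by_cases hmem : ((x : Int) + 1) ∈ PySem.List.slice row (some 1) none <;>
    by_cases hxn : (x : Int) < n <;>
      simp [h1, h2, hmem, hxn]

def pvFin : Option Int → Int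
  | none => -1
  | some r => r

-- ===== VERDICT (by name: the statement is the Claim_ definition above) =====
theorem solution_spec : Claim_equal_solution := by
  unfold Claim_equal_solution
  intro n people area _hdom hpre
  obtain ⟨hA, hP⟩ := hpre
  unfold Spec_solution
  simp only [solution, solution_alt]
  show pvFin _ = pvFin _
  apply congrArg pvFin
  simp only [decide_not]
  apply PySem.List.foldl_congr_mem
  intro acc k hk
  apply PySem.List.foldl_congr_mem
  intro acc2 combi hc
  -- arithmetic facts about k and n
  obtain ⟨hk1, hk2⟩ := PySem.List.mem_pyRange_one.mp hk
  obtain ⟨hsub, hlenc⟩ := (PySem.List.mem_combinations_iff _ _ _).mp hc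
  have hkfd : k ≤ PySem.Int.floordiv n 2 := by omega
  have hn2 : 2 ≤ n := by
    have := (PySem.Int.le_floordiv_iff_mul_le (by norm_num : (0:Int) < 2)).mp (le_trans hk1 hkfd)
    omega
  have hfd_lt : PySem.Int.floordiv n 2 < n := by
    rw [PySem.Int.floordiv_lt_iff_lt_mul (by norm_num : (0:Int) < 2)]
    omega
  have hkn : k < n := lt_of_le_of_lt hkfd hfd_lt
  have hAr : n ≤ (area.length : Int) := hA (by omega)
  have hPe : n ≤ (people.length : Int) := hP (by omega)
  have hnodesnd : (PySem.List.pyRange 0 n 1).Nodup := PySem.List.nodup_pyRange_one 0 n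
  have hcnd : combi.Nodup := hnodesnd.sublist hsub
  have hlc1 : 1 ≤ combi.length := by omega
  have hcne : combi ≠ [] := by
    intro h
    rw [h] at hlc1
    simp at hlc1
  have hnodeslen : (PySem.List.pyRange 0 n 1).length = n.toNat := by
    rw [PySem.List.length_pyRange_one]
    omega
  have hclt : combi.length < n.toNat := by omega
  have hcsubN : ∀ x ∈ combi, x ∈ PySem.List.pyRange 0 n 1 := fun x hx => hsub.subset hx
  have hSn1 : ∀ v ∈ combi, 0 ≤ v ∧ v < n := by
    intro v hv
    exact PySem.List.mem_pyRange_one.mp (hcsubN v hv)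
  -- the complement side (A's literal filter term, after decide_not normalization)
  have hfilter_pos : (PySem.List.pyRange 0 n 1).filter (fun x => decide (x ∈ combi)) = combi :=
    nodup_filter_mem_sublist hsub hnodesnd
  have hpermA : (combi ++ (PySem.List.pyRange 0 n 1).filter (fun j => !decide (j ∈ combi))).Perm
      (PySem.List.pyRange 0 n 1) := by
    have hp := List.filter_append_perm (fun x => decide (x ∈ combi)) (PySem.List.pyRange 0 n 1)
    rw [hfilter_pos] at hp
    exact hp
  have hs2nd : ((PySem.List.pyRange 0 n 1).filter (fun j => !decide (j ∈ combi))).Nodup :=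
    hnodesnd.filter _
  have hs2len : combi.length + ((PySem.List.pyRange 0 n 1).filter (fun j => !decide (j ∈ combi))).length = n.toNat := by
    have := hpermA.length_eq
    simpa [hnodeslen] using this
  have hs2ne : (PySem.List.pyRange 0 n 1).filter (fun j => !decide (j ∈ combi)) ≠ [] := by
    intro h
    rw [h] at hs2len
    simp at hs2len
    omega
  have hs2subN : ∀ x ∈ (PySem.List.pyRange 0 n 1).filter (fun j => !decide (j ∈ combi)),
      x ∈ PySem.List.pyRange 0 n 1 := fun x hx => (List.mem_filter.mp hx).1
  have hSn2 : ∀ v ∈ (PySem.List.pyRange 0 n 1).filter (fun j => !decide (j ∈ combi)),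
      0 ≤ v ∧ v < n := by
    intro v hv
    exact PySem.List.mem_pyRange_one.mp (hs2subN v hv)
  -- A's adjacency dictionary rows are pvRow on the nodes
  set grf := (PySem.List.pyRange 0 n 1).foldl
    (fun g i => (PySem.List.slice (PySem.List.pyGetD area i []) (some 1) none).foldl
      (fun (g : PySem.Dict Int (List Int)) a => g.modify i [] (· ++ [a - 1])) g)
    PySem.Dict.empty with hgrf
  have hgr : ∀ j ∈ PySem.List.pyRange 0 n 1, grf.getD j [] = pvRow area j := by
    intro j hj
    rw [hgrf, getD_graph _ area _ j hnodesnd]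
    simp [PySem.Dict.getD_empty, hj]
  have hreach : ∀ (S : List Int), (∀ x ∈ S, x ∈ PySem.List.pyRange 0 n 1) → ∀ s ∈ S, ∀ x,
      (pvReach (fun u => grf.getD u []) S s x ↔ pvReach (fun u => pvRow area u) S s x) := by
    intro S hS s hs x
    constructor
    · exact pvReach_congr (fun u hu => hgr u (hS u hu)) hs
    · exact pvReach_congr (fun u hu => (hgr u (hS u hu)).symm) hs
  -- B's neighbor-mask list
  set nbrL := (PySem.List.pyRange 0 n 1).foldl
    (fun l i => l ++ [nbrOf n (PySem.List.pyGetD area i [])]) ([] : List Nat) with hnbrL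
  have hnbrMap : nbrL = (PySem.List.pyRange 0 n 1).map (fun i => nbrOf n (PySem.List.pyGetD area i [])) := by
    rw [hnbrL, PySem.List.foldl_append_singleton_eq_map]
    simp
  have hnbrChar : ∀ i : Nat, ((i : Int) < n) → ∀ v : Nat,
      (PySem.List.pyGetD nbrL (i : Int) 0).testBit v
        = (decide ((v : Int) ∈ pvRow area (i : Int)) && decide ((v : Int) < n)) := by
    intro i hi v
    rw [hnbrMap, PySem.List.pyGetD_map_pyRange_of_nonneg _ n _ _ (Int.natCast_nonneg i) hi]
    rw [testBit_nbrOf]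
    rfl
  -- the two side masks
  have hm1 : ∀ x : Nat,
      (combi.foldl (fun m v => m ||| (1 <<< v.toNat)) 0).testBit x = decide ((x : Int) ∈ combi) := by
    intro x
    rw [testBit_listMask combi (fun v hv => (hSn1 v hv).1) 0 x]
    simp
  have hm2 : ∀ x : Nat,
      (((1 <<< n.toNat) - 1) ^^^ (combi.foldl (fun m v => m ||| (1 <<< v.toNat)) 0)).testBit x
        = decide ((x : Int) ∈ (PySem.List.pyRange 0 n 1).filter (fun j => !decide (j ∈ combi))) := by
    intro x
    rw [Nat.testBit_xor, hm1 x]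
    have h2p : (1 <<< n.toNat : Nat) = 2 ^ n.toNat := by
      rw [Nat.shiftLeft_eq, one_mul]
    rw [h2p, Nat.testBit_two_pow_sub_one]
    by_cases hxc : (x : Int) ∈ combi
    · have hxn : (x : Int) < n := (hSn1 _ hxc).2
      have hxn' : x < n.toNat := by omega
      simp [hxn', hxc, List.mem_filter]
    · by_cases hxn : x < n.toNat
      · have hxr : (x : Int) ∈ PySem.List.pyRange 0 n 1 :=
          PySem.List.mem_pyRange_one.mpr ⟨Int.natCast_nonneg x, by omega⟩
        simp [hxn, hxc, List.mem_filter, hxr]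
      · have hxr : (x : Int) ∉ PySem.List.pyRange 0 n 1 := by
          intro hm
          have := PySem.List.mem_pyRange_one.mp hm
          omega
        simp [hxn, hxc, List.mem_filter, hxr]
  -- starts
  have hst1 : PySem.List.pyGetD combi 0 0 ∈ combi := by
    obtain ⟨c0, cr, hce⟩ := List.exists_cons_of_ne_nil hcne
    rw [hce, PySem.List.pyGetD_zero_cons]
    exact List.mem_cons_self
  have hst1nn : 0 ≤ PySem.List.pyGetD combi 0 0 := (hSn1 _ hst1).1
  -- the least index outside combi: B's while loop and A's filter head agree on it
  have hex : ∃ x : Nat, (combi.foldl (fun m v => m ||| (1 <<< v.toNat)) 0).testBit x = false := by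
    by_contra h
    push_neg at h
    have hsubR : ∀ j ∈ PySem.List.pyRange 0 n 1, j ∈ combi := by
      intro j hj
      obtain ⟨hj0, _⟩ := PySem.List.mem_pyRange_one.mp hj
      have hb := h j.toNat
      rcases pvBoolCases ((combi.foldl (fun m v => m ||| (1 <<< v.toNat)) 0).testBit j.toNat) with hb' | hb'
      · exact absurd hb' hb
      · rw [hm1 j.toNat] at hb'
        have := of_decide_eq_true hb'
        rwa [Int.toNat_of_nonneg hj0] at this
    have := (List.subperm_of_subset hnodesnd hsubR).length_le
    omega
  have ht0 := Nat.find_spec hex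
  have hlt0 : ∀ u, u < Nat.find hex →
      (combi.foldl (fun m v => m ||| (1 <<< v.toNat)) 0).testBit u = true := by
    intro u hu
    have := Nat.find_min hex hu
    rcases pvBoolCases ((combi.foldl (fun m v => m ||| (1 <<< v.toNat)) 0).testBit u) with h' | h'
    · exact absurd h' this
    · exact h'
  have ht0mem : ∀ u : Nat, u < Nat.find hex → ((u : Int) ∈ combi) := by
    intro u hu
    have := hlt0 u hu
    rw [hm1 u] at this
    exact of_decide_eq_true this
  have ht0n : Nat.find hex < n.toNat := by
    have hsubT : ∀ j ∈ PySem.List.pyRange 0 (Nat.find hex : Int) 1, j ∈ combi := by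
      intro j hj
      obtain ⟨hj0, hjt⟩ := PySem.List.mem_pyRange_one.mp hj
      have : j.toNat < Nat.find hex := by omega
      have hmem := ht0mem j.toNat this
      rwa [Int.toNat_of_nonneg hj0] at hmem
    have hnd := PySem.List.nodup_pyRange_one 0 (Nat.find hex : Int)
    have := (List.subperm_of_subset hnd hsubT).length_le
    rw [PySem.List.length_pyRange_one] at this
    omega
  have hnotc : ((Nat.find hex : Int) ∉ combi) := by
    intro hmem
    have := hm1 (Nat.find hex)
    rw [ht0] at this
    exact absurd hmem (of_decide_eq_false this.symm)
  have hs2eq : lowClearB (combi.foldl (fun m v => m ||| (1 <<< v.toNat)) 0) n.toNat 0 = Nat.find hex :=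
    lowClearB_eq _ n.toNat 0 (Nat.find hex) (Nat.zero_le _) (fun u _ hu => hlt0 u hu) ht0 (by omega)
  have hstart2A : PySem.List.pyGetD
      (((PySem.List.pyRange 0 n 1).filter (fun j => !decide (j ∈ combi)))) 0 0 = (Nat.find hex : Int) := by
    apply head_filter_pyRange (fun j => !decide (j ∈ combi)) n (Nat.find hex) 0
    · exact Int.natCast_nonneg _
    · omega
    · omega
    · simp [hnotc]
    · intro u hu hut
      have : u.toNat < Nat.find hex := by omega
      have hmem := ht0mem u.toNat this
      rw [Int.toNat_of_nonneg hu] at hmem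
      simp [hmem]
  have ht0side : (Nat.find hex : Int) ∈ (PySem.List.pyRange 0 n 1).filter (fun j => !decide (j ∈ combi)) := by
    rw [List.mem_filter]
    exact ⟨PySem.List.mem_pyRange_one.mpr ⟨Int.natCast_nonneg _, by omega⟩, by simp [hnotc]⟩
  -- the two bitset connectivity tests, in reachability form
  have hcl1 := closedB_iff n nbrL (combi.foldl (fun m v => m ||| (1 <<< v.toNat)) 0) combi
    (fun u => pvRow area u) (PySem.List.pyGetD combi 0 0).toNat hm1 hSn1
    (by rwa [Int.toNat_of_nonneg hst1nn])
    (fun i hi v => hnbrChar i (hSn1 _ hi).2 v)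
  rw [Int.toNat_of_nonneg hst1nn] at hcl1
  have hcl2 := closedB_iff n nbrL
    (((1 <<< n.toNat) - 1) ^^^ (combi.foldl (fun m v => m ||| (1 <<< v.toNat)) 0))
    ((PySem.List.pyRange 0 n 1).filter (fun j => !decide (j ∈ combi)))
    (fun u => pvRow area u) (Nat.find hex) hm2 hSn2 ht0side
    (fun i hi v => hnbrChar i (hSn2 _ hi).2 v)
  -- the two BFS runs of A
  obtain ⟨V1, hb1, hV1nd, hV1ch⟩ := bfs_spec people grf combi hcnd hcne
  obtain ⟨V2, hb2, hV2nd, hV2ch⟩ := bfs_spec people grf _ hs2nd hs2ne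
  rw [hstart2A] at hV2ch
  have hV1ch' : ∀ x, x ∈ V1 ↔ pvReach (fun u => pvRow area u) combi (PySem.List.pyGetD combi 0 0) x := by
    intro x
    rw [hV1ch x, hreach combi hcsubN _ hst1 x]
  have hV2ch' : ∀ x, x ∈ V2 ↔ pvReach (fun u => pvRow area u)
      ((PySem.List.pyRange 0 n 1).filter (fun j => !decide (j ∈ combi))) (Nat.find hex : Int) x := by
    intro x
    rw [hV2ch x, hreach _ hs2subN _ ht0side x]
  have hV1sub : ∀ x ∈ V1, x ∈ combi := by
    intro x hx
    rcases pvReach_mem ((hV1ch' x).mp hx) with h | h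
    · exact h
    · exact h ▸ hst1
  have hV2sub : ∀ x ∈ V2, x ∈ (PySem.List.pyRange 0 n 1).filter (fun j => !decide (j ∈ combi)) := by
    intro x hx
    rcases pvReach_mem ((hV2ch' x).mp hx) with h | h
    · exact h
    · exact h ▸ ht0side
  have hc1le : V1.length ≤ combi.length := (List.subperm_of_subset hV1nd hV1sub).length_le
  have hc2le : V2.length ≤ ((PySem.List.pyRange 0 n 1).filter (fun j => !decide (j ∈ combi))).length :=
    (List.subperm_of_subset hV2nd hV2sub).length_le
  -- coverage ↔ full length, for each side
  have hiff1 : (∀ x ∈ combi, pvReach (fun u => pvRow area u) combi (PySem.List.pyGetD combi 0 0) x)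
      ↔ V1.length = combi.length := by
    constructor
    · intro hcov
      have hperm : V1.Perm combi := by
        rw [List.perm_ext_iff_of_nodup hV1nd hcnd]
        intro x
        exact ⟨fun hx => hV1sub x hx, fun hx => (hV1ch' x).mpr (hcov x hx)⟩
      exact hperm.length_eq
    · intro hlen
      have hperm : V1.Perm combi :=
        (List.subperm_of_subset hV1nd hV1sub).perm_of_length_le (by omega)
      intro x hx
      exact (hV1ch' x).mp (hperm.mem_iff.mpr hx)
  have hiff2 : (∀ x ∈ (PySem.List.pyRange 0 n 1).filter (fun j => !decide (j ∈ combi)),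
        pvReach (fun u => pvRow area u)
          ((PySem.List.pyRange 0 n 1).filter (fun j => !decide (j ∈ combi))) (Nat.find hex : Int) x)
      ↔ V2.length = ((PySem.List.pyRange 0 n 1).filter (fun j => !decide (j ∈ combi))).length := by
    constructor
    · intro hcov
      have hperm : V2.Perm ((PySem.List.pyRange 0 n 1).filter (fun j => !decide (j ∈ combi))) := by
        rw [List.perm_ext_iff_of_nodup hV2nd hs2nd]
        intro x
        exact ⟨fun hx => hV2sub x hx, fun hx => (hV2ch' x).mpr (hcov x hx)⟩
      exact hperm.length_eq
    · intro hlen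
      have hperm : V2.Perm ((PySem.List.pyRange 0 n 1).filter (fun j => !decide (j ∈ combi))) :=
        (List.subperm_of_subset hV2nd hV2sub).perm_of_length_le (by omega)
      intro x hx
      exact (hV2ch' x).mp (hperm.mem_iff.mpr hx)
  rw [hiff1] at hcl1
  rw [hiff2] at hcl2
  -- now compare the two branches
  rw [hb1, hb2, hs2eq]
  by_cases hC : ((V1.length : Int) + (V2.length : Int)) = n
  · have hlen1 : V1.length = combi.length := by omega
    have hlen2 : V2.length = ((PySem.List.pyRange 0 n 1).filter (fun j => !decide (j ∈ combi))).length := by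
      omega
    have hcl1t : closedB n nbrL (combi.foldl (fun m v => m ||| (1 <<< v.toNat)) 0)
        (PySem.List.pyGetD combi 0 0).toNat = true := hcl1.mpr hlen1
    have hcl2t : closedB n nbrL
        (((1 <<< n.toNat) - 1) ^^^ (combi.foldl (fun m v => m ||| (1 <<< v.toNat)) 0))
        (Nat.find hex) = true := hcl2.mpr hlen2
    have hV1perm : V1.Perm combi :=
      (List.subperm_of_subset hV1nd hV1sub).perm_of_length_le (by omega)
    have hV2perm : V2.Perm ((PySem.List.pyRange 0 n 1).filter (fun j => !decide (j ∈ combi))) :=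
      (List.subperm_of_subset hV2nd hV2sub).perm_of_length_le (by omega)
    have hsum1 : (V1.map (fun v => PySem.List.pyGetD people v 0)).sum
        = (combi.map (fun v => PySem.List.pyGetD people v 0)).sum :=
      (hV1perm.map _).sum_eq
    have hsum2 : (V2.map (fun v => PySem.List.pyGetD people v 0)).sum
        = (((PySem.List.pyRange 0 n 1).filter (fun j => !decide (j ∈ combi))).map (fun v => PySem.List.pyGetD people v 0)).sum :=
      (hV2perm.map _).sum_eq
    have htotal : (PySem.List.slice people none (some n)).sum
        = (combi.map (fun v => PySem.List.pyGetD people v 0)).sum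
          + (((PySem.List.pyRange 0 n 1).filter (fun j => !decide (j ∈ combi))).map (fun v => PySem.List.pyGetD people v 0)).sum := by
      rw [PySem.List.slice_to people (by omega)]
      rw [← total_map_take n people (by omega) hPe]
      rw [← (hpermA.map (fun v => PySem.List.pyGetD people v 0)).sum_eq]
      rw [List.map_append, List.sum_append]
    have hcand : |(V1.map (fun v => PySem.List.pyGetD people v 0)).sum
          - (V2.map (fun v => PySem.List.pyGetD people v 0)).sum|
        = |2 * (combi.map (fun v => PySem.List.pyGetD people v 0)).sum
          - (PySem.List.slice people none (some n)).sum| := by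
      rw [hsum1, hsum2, htotal]
      congr 1
      ring
    simp only [hC, if_pos, hcl1t, hcl2t, Bool.and_self, if_true]
    rcases acc2 with _ | b
    · simp [hcand]
    · simp only []
      rw [hcand]
      by_cases hdb : |2 * (combi.map (fun v => PySem.List.pyGetD people v 0)).sum
          - (PySem.List.slice people none (some n)).sum| < b
      · simp [hdb, min_eq_right (le_of_lt hdb)]
      · simp [hdb, min_eq_left (le_of_not_gt hdb)]
  · have hand : (closedB n nbrL (combi.foldl (fun m v => m ||| (1 <<< v.toNat)) 0)
          (PySem.List.pyGetD combi 0 0).toNat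
        && closedB n nbrL
          (((1 <<< n.toNat) - 1) ^^^ (combi.foldl (fun m v => m ||| (1 <<< v.toNat)) 0))
          (Nat.find hex)) = false := by
      rcases pvBoolCases (closedB n nbrL (combi.foldl (fun m v => m ||| (1 <<< v.toNat)) 0)
          (PySem.List.pyGetD combi 0 0).toNat
        && closedB n nbrL
          (((1 <<< n.toNat) - 1) ^^^ (combi.foldl (fun m v => m ||| (1 <<< v.toNat)) 0))
          (Nat.find hex)) with h' | h'
      · exact h'
      · obtain ⟨h1, h2⟩ := pvAndTrue h'
        have := hcl1.mp h1
        have := hcl2.mp h2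
        omega
    simp [hC, hand]
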